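-- pv_equiv track=rewrite | github.com/Adeline-Chew/Dynamic-Programming | assignment2.py | bu_best_itinerary
-- ===== SOURCE A (Python) =====
-- def bu_best_itinerary(possible_path, days, cities, quarantine_time):
--     """[This helper function uses dynamic programming with two memoization to get the optimal profits.
--         This algorithm starts from future and move backward to the past, and the optimal solutions in the future
--         is used to decide the optimal in the past. For every position at no_qua_memo, the salesperson have already done
--         his quarantine at current city, he has three options which are:
--         (i) Continue staying in current city in the future
--         (ii) Move to right city in the future (Take optimal from qua_memo)
--         (iii) Move to left city in the future (Take optimal from qua_memo)
--         While for every position at qua_memo, the status of salesperson is travelling and hasn't started quarantine,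
--         he has three options as well:
--         (i) Started to quarantine at current city (Take optimal from no_qua_memo)
--         (ii) Continue moving right in the future
--         (iii) Continue moving left in the future
--         All of his decisions will based on the maximum profit among these options.]
--     Complexity:
--         Time: O(ND) where N is the len(quarantine_time)
--             and D is value of days
--         Aux Space: O(ND) where N is the len(quarantine_time)
--             and D is value of days
--     Args:
--         possible_path ([List]): [2D matrix that contains all initial possible profits]
--         days ([Int]): [Total days available]
--         cities ([type]): [Number of cities]
--         quarantine_time ([type]): [Quarantine time needed for every city]
--     Returns:
--         [Int]: [The maximum amount of money the salesperson can make]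
--     """
--     no_qua_memo = [[0] * cities for _ in range(days + 1)]
--     qua_memo = [[0] * cities for _ in range(days + 1)]
--     for day in range(days - 1, -1, -1):
--         for city in range(cities):
--             current_profit = possible_path[day + 1][city]
--             if city == 0:  # leftmost city
--                 stay_no_qua = no_qua_memo[day + 1][city] + current_profit  # continue staying in the same city in future
--                 to_right = qua_memo[day + 1][city + 1]  # going to next city in future
--                 no_qua_memo[day][city] = max(stay_no_qua, to_right)  # get the optimal
--
--                 # Start quarantine in current city, see the optimal he can get if he quarantine here
--                 stay_qua = no_qua_memo[day + quarantine_time[city]][city] if day + quarantine_time[city] < days else 0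
--                 qua_memo[day][city] = max(stay_qua, to_right)
--
--             elif city == cities - 1:  # rightmost city
--                 stay_no_qua = no_qua_memo[day + 1][city] + current_profit
--                 to_left = qua_memo[day + 1][city - 1]
--                 no_qua_memo[day][city] = max(stay_no_qua, to_left)
--
--                 stay_qua = no_qua_memo[day + quarantine_time[city]][city] if day + quarantine_time[city] < days else 0
--                 qua_memo[day][city] = max(stay_qua, to_left)
--             else:
--                 stay_no_qua = no_qua_memo[day + 1][city] + current_profit
--                 to_right = qua_memo[day + 1][city + 1]
--                 to_left = qua_memo[day + 1][city - 1]
--                 no_qua_memo[day][city] = max(stay_no_qua, to_right, to_left)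
--
--                 stay_qua = no_qua_memo[day + quarantine_time[city]][city] if day + quarantine_time[city] < days else 0
--                 qua_memo[day][city] = max(stay_qua, to_right, to_left)
--     return max(max(no_qua_memo[0]), max(qua_memo[0]))
-- ===== SOURCE B (Python) =====
-- # Top-down memoized recursion: two cached functions no_qua/qua mirror the recurrence
-- # directly; a backward warm-up of the cache keeps the recursion depth O(1).
-- def bu_best_itinerary(possible_path, days, cities, quarantine_time):
--     memo = {}
--
--     def no_qua(day, city):
--         # best profit from `day` on, already quarantined in `city`
--         if day == days:
--             return 0
--         key = ('n', day, city)
--         if key not in memo: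
--             best = no_qua(day + 1, city) + possible_path[day + 1][city]
--             if city + 1 < cities:
--                 best = max(best, qua(day + 1, city + 1))
--             if city >= 1:
--                 best = max(best, qua(day + 1, city - 1))
--             memo[key] = best
--         return memo[key]
--
--     def qua(day, city):
--         # best profit from `day` on, travelling (not yet quarantined)
--         if day == days:
--             return 0
--         key = ('q', day, city)
--         if key not in memo:
--             jump = day + quarantine_time[city]
--             best = no_qua(jump, city) if jump < days else 0
--             if city + 1 < cities:
--                 best = max(best, qua(day + 1, city + 1))
--             if city >= 1:
--                 best = max(best, qua(day + 1, city - 1))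
--             memo[key] = best
--         return memo[key]
--
--     # warm the cache from the future so each call recurses O(1) deep
--     for day in reversed(range(days)):
--         for city in range(cities):
--             no_qua(day, city)
--         for city in range(cities):
--             qua(day, city)
--     return max(max(no_qua(0, c) for c in range(cities)),
--                max(qua(0, c) for c in range(cities)))
-- ===== Notes on version B (the rewrite author's own statement) =====
-- stated objective: alternative
-- what changed: Replaces the bottom-up two-table DP with explicit per-edge-city branches by top-down memoized recursion: two cached mutually recursive functions no_qua/qua state the recurrence directly with neighbour guards and a dict memo (warmed backward so the stack stays O(1)); Pre_ excludes negative quarantine times, where A's value comes from accidental negative-index wraparound into its tables while B's recursion on earlier days blows the recursion limit.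
-- outside the precondition, e.g. on bu_best_itinerary([[0, 0], [5, 1], [2, 2], [3, 3]], 3, 2, [-4, 0]): A returns 10, B raises RecursionError
import Mathlib
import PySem

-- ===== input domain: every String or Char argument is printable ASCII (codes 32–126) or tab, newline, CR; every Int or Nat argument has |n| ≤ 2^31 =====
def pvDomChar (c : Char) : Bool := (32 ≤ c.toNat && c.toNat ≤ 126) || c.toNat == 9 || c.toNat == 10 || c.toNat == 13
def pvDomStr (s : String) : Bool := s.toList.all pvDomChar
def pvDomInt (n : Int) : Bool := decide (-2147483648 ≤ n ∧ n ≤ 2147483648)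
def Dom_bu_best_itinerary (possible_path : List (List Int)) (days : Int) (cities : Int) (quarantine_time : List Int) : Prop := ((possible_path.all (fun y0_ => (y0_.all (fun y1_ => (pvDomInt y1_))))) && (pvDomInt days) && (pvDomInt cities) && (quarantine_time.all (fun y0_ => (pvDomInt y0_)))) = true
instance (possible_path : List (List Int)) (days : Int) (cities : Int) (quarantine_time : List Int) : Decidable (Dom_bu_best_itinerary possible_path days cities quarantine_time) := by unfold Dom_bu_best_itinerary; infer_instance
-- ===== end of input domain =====

-- B replaces A's bottom-up two-table DP (explicit branches per edge city, in-place writes)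
-- by top-down memoized recursion: two cached recursive functions stating the recurrence,
-- with a backward warm-up of the cache; equal return value on Pre_.

-- ===== PORT A =====
-- xs[i][j] for in-range indices (Pre_ keeps every index used in range)
def pvGet2 (t : List (List Int)) (i j : Int) : Int :=
  PySem.List.pyGetD (PySem.List.pyGetD t i []) j 0

-- t[i][j] = v (in-place 2D assignment; indices are nonnegative and in range under Pre_)
def pvSet2 (t : List (List Int)) (i j : Int) (v : Int) : List (List Int) :=
  t.set i.toNat ((t.getD i.toNat []).set j.toNat v)

-- body of A's inner loop over `city`
def pvACity (possible_path : List (List Int)) (quarantine_time : List Int)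
    (days cities day : Int) (st : List (List Int) × List (List Int)) (city : Int) :
    List (List Int) × List (List Int) :=
  let noQ := st.1
  let quaQ := st.2
  let current := pvGet2 possible_path (day + 1) city
  let q := PySem.List.pyGetD quarantine_time city 0
  if city = 0 then
    let stayNo := pvGet2 noQ (day + 1) city + current
    let toRight := pvGet2 quaQ (day + 1) (city + 1)
    let noQ := pvSet2 noQ day city (max stayNo toRight)
    let stayQ := if day + q < days then pvGet2 noQ (day + q) city else 0
    (noQ, pvSet2 quaQ day city (max stayQ toRight))
  else if city = cities - 1 then
    let stayNo := pvGet2 noQ (day + 1) city + current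
    let toLeft := pvGet2 quaQ (day + 1) (city - 1)
    let noQ := pvSet2 noQ day city (max stayNo toLeft)
    let stayQ := if day + q < days then pvGet2 noQ (day + q) city else 0
    (noQ, pvSet2 quaQ day city (max stayQ toLeft))
  else
    let stayNo := pvGet2 noQ (day + 1) city + current
    let toRight := pvGet2 quaQ (day + 1) (city + 1)
    let toLeft := pvGet2 quaQ (day + 1) (city - 1)
    let noQ := pvSet2 noQ day city (max (max stayNo toRight) toLeft)
    let stayQ := if day + q < days then pvGet2 noQ (day + q) city else 0
    (noQ, pvSet2 quaQ day city (max (max stayQ toRight) toLeft))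

def bu_best_itinerary (possible_path : List (List Int)) (days : Int) (cities : Int) (quarantine_time : List Int) : Int :=
  let noQua0 := (PySem.List.pyRange 0 (days + 1) 1).map (fun _ => List.replicate cities.toNat (0 : Int))
  let qua0 := (PySem.List.pyRange 0 (days + 1) 1).map (fun _ => List.replicate cities.toNat (0 : Int))
  let st := (PySem.List.pyRange (days - 1) (-1) (-1)).foldl
    (fun st day => (PySem.List.pyRange 0 cities 1).foldl
      (pvACity possible_path quarantine_time days cities day) st)
    (noQua0, qua0)
  max ((PySem.List.max? (PySem.List.pyGetD st.1 0 []) (fun x => x)).getD 0)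
      ((PySem.List.max? (PySem.List.pyGetD st.2 0 []) (fun x => x)).getD 0)

-- ===== PORT B =====
-- memo key ('n'/'q', day, city)
def pvBKey (ph : Bool) (d c : Int) : String × Int × Int := (if ph then "q" else "n", d, c)

-- B's two cached recursive functions as one function with a phase flag (ph = true is `qua`),
-- threading the memo dict; `fuel` only makes the recursion total in Lean (the caller passes
-- more than the recursion ever uses, so the 0 case is never reached under Pre_)
def pvRun (pp : List (List Int)) (qt : List Int) (days cities : Int) :
    Nat → Bool → Int → Int → PySem.Dict (String × Int × Int) Int →
    PySem.Dict (String × Int × Int) Int × Int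
  | 0, _, _, _, m => (m, 0)
  | f + 1, ph, d, c, m =>
    if d = days then (m, 0)
    else
      match m.get? (pvBKey ph d c) with
      | some v => (m, v)
      | none =>
        let r1 :=
          if ph then
            let jump := d + PySem.List.pyGetD qt c 0
            if jump < days then pvRun pp qt days cities f false jump c m else (m, 0)
          else
            let r := pvRun pp qt days cities f false (d + 1) c m
            (r.1, r.2 + pvGet2 pp (d + 1) c)
        let r2 :=
          if c + 1 < cities then
            let r := pvRun pp qt days cities f true (d + 1) (c + 1) r1.1
            (r.1, max r1.2 r.2)
          else r1
        let r3 :=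
          if 1 ≤ c then
            let r := pvRun pp qt days cities f true (d + 1) (c - 1) r2.1
            (r.1, max r2.2 r.2)
          else r2
        let m4 := r3.1.insert (pvBKey ph d c) r3.2
        (m4, m4.getD (pvBKey ph d c) 0)

def bu_best_itinerary_alt (possible_path : List (List Int)) (days : Int) (cities : Int) (quarantine_time : List Int) : Int :=
  let fuel := 2 * days.toNat + 3
  let warm := ((PySem.List.pyRange 0 days 1).reverse).foldl
    (fun m day =>
      let m1 := (PySem.List.pyRange 0 cities 1).foldl
        (fun m city => (pvRun possible_path quarantine_time days cities fuel false day city m).1) m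
      (PySem.List.pyRange 0 cities 1).foldl
        (fun m city => (pvRun possible_path quarantine_time days cities fuel true day city m).1) m1)
    PySem.Dict.empty
  let g1 := (PySem.List.pyRange 0 cities 1).foldl
    (fun (st : PySem.Dict (String × Int × Int) Int × List Int) c =>
      let r := pvRun possible_path quarantine_time days cities fuel false 0 c st.1
      (r.1, r.2 :: st.2)) (warm, [])
  let g2 := (PySem.List.pyRange 0 cities 1).foldl
    (fun (st : PySem.Dict (String × Int × Int) Int × List Int) c =>
      let r := pvRun possible_path quarantine_time days cities fuel true 0 c st.1
      (r.1, r.2 :: st.2)) (g1.1, [])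
  max ((PySem.List.max? g1.2.reverse (fun x => x)).getD 0)
      ((PySem.List.max? g2.2.reverse (fun x => x)).getD 0)

-- ===== PRECONDITION & SPEC =====
-- Pre_ excludes inputs where A raises (negative days, too few cities, short possible_path or
-- quarantine_time) and negative quarantine times: there A's negative index wraps around into its
-- tables (an accident of the table layout) while B's recursion walks into ever earlier days and
-- hits the recursion limit.
def Pre_bu_best_itinerary (possible_path : List (List Int)) (days : Int) (cities : Int) (quarantine_time : List Int) : Prop :=
  0 ≤ days ∧ 1 ≤ cities ∧
  (1 ≤ days →
    2 ≤ cities ∧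
    days + 1 ≤ (possible_path.length : Int) ∧
    (∀ row ∈ (possible_path.drop 1).take days.toNat, cities ≤ (row.length : Int)) ∧
    cities ≤ (quarantine_time.length : Int) ∧
    (∀ q ∈ quarantine_time.take cities.toNat, 0 ≤ q))
instance (possible_path : List (List Int)) (days : Int) (cities : Int) (quarantine_time : List Int) : Decidable (Pre_bu_best_itinerary possible_path days cities quarantine_time) := by unfold Pre_bu_best_itinerary; infer_instance

def pvWitness_bu_best_itinerary : List (List Int) × Int × Int × List Int :=
  ([[0, 0], [3, 1]], 1, 2, [0, 1])

def Spec_bu_best_itinerary (possible_path : List (List Int)) (days : Int) (cities : Int) (quarantine_time : List Int) (out : Int) : Prop := out = bu_best_itinerary_alt possible_path days cities quarantine_time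
instance (possible_path : List (List Int)) (days : Int) (cities : Int) (quarantine_time : List Int) (out : Int) : Decidable (Spec_bu_best_itinerary possible_path days cities quarantine_time out) := by unfold Spec_bu_best_itinerary; infer_instance

-- ===== CLAIM (what is proved, stated in full; the proofs are below) =====
def Claim_equal_bu_best_itinerary : Prop := ∀ (possible_path : List (List Int)) (days : Int) (cities : Int) (quarantine_time : List Int), Dom_bu_best_itinerary possible_path days cities quarantine_time → Pre_bu_best_itinerary possible_path days cities quarantine_time → Spec_bu_best_itinerary possible_path days cities quarantine_time (bu_best_itinerary possible_path days cities quarantine_time)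

-- ===== LEMMAS AND PROOFS =====

-- the common recurrence both programs compute: pvS ph d c is the best profit from day d on
-- in city c, ph = false after quarantining there, ph = true while travelling
def pvS (pp : List (List Int)) (qt : List Int) (D C : Nat) (ph : Bool) (d c : Nat) : Int :=
  if h : d < D then
    let base :=
      if ph then
        if _h2 : d + (PySem.List.pyGetD qt (c : Int) 0).toNat < D then
          pvS pp qt D C false (d + (PySem.List.pyGetD qt (c : Int) 0).toNat) c
        else 0
      else
        pvS pp qt D C false (d + 1) c + pvGet2 pp ((d : Int) + 1) (c : Int)
    let b1 := if c + 1 < C then max base (pvS pp qt D C true (d + 1) (c + 1)) else base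
    if 1 ≤ c then max b1 (pvS pp qt D C true (d + 1) (c - 1)) else b1
  else 0
termination_by 2 * (D - d) + ph.toNat
decreasing_by all_goals cases ph <;> simp only [Bool.toNat_false, Bool.toNat_true] <;> first | contradiction | omega

theorem pvS_stop (pp : List (List Int)) (qt : List Int) (D C : Nat) (ph : Bool) (d c : Nat)
    (h : ¬ d < D) : pvS pp qt D C ph d c = 0 := by
  rw [pvS]; simp [h]

def pvBase (pp : List (List Int)) (qt : List Int) (D C : Nat) (ph : Bool) (d c : Nat) : Int :=
  if ph then
    (if d + (PySem.List.pyGetD qt (c : Int) 0).toNat < D then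
      pvS pp qt D C false (d + (PySem.List.pyGetD qt (c : Int) 0).toNat) c
    else 0)
  else
    pvS pp qt D C false (d + 1) c + pvGet2 pp ((d : Int) + 1) (c : Int)

theorem pvS_unfold (pp : List (List Int)) (qt : List Int) (D C : Nat) (ph : Bool) (d c : Nat)
    (h : d < D) :
    pvS pp qt D C ph d c =
      (let b1 := if c + 1 < C then max (pvBase pp qt D C ph d c) (pvS pp qt D C true (d + 1) (c + 1))
                 else pvBase pp qt D C ph d c;
       if 1 ≤ c then max b1 (pvS pp qt D C true (d + 1) (c - 1)) else b1) := by
  rw [pvS]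
  simp only [dif_pos h, dite_eq_ite]
  rfl

-- spec row for one day, and the table A's arrays hold after the days ≥ n are processed
def pvRow (pp : List (List Int)) (qt : List Int) (D C : Nat) (ph : Bool) (n : Nat) : List Int :=
  (List.range C).map (pvS pp qt D C ph n)

def pvTbl (r : Nat → List Int) (C D n : Nat) : List (List Int) :=
  (List.range (D + 1)).map (fun i => if n ≤ i then r i else List.replicate C 0)

theorem pvGetD_set_self {α : Type} (l : List α) (i : Nat) (h : i < l.length) (v d : α) :
    (l.set i v).getD i d = v := by
  simp [List.getD_eq_getElem?_getD, h]

theorem pvGetD_set_ne {α : Type} (l : List α) (i j : Nat) (hij : i ≠ j) (v d : α) :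
    (l.set i v).getD j d = l.getD j d := by
  simp [List.getD_eq_getElem?_getD, List.getElem?_set_ne hij]

theorem pvSet_getD_self {α : Type} (l : List α) (i : Nat) (h : i < l.length) (d : α) :
    l.set i (l.getD i d) = l := by
  rw [List.getD_eq_getElem l d h]; exact List.set_getElem_self ..

theorem pvRow_set (f : Nat → Int) (c C : Nat) (h : c < C) :
    (((List.range c).map f ++ List.replicate (C - c) (0 : Int)).set c (f c))
      = (List.range (c + 1)).map f ++ List.replicate (C - (c + 1)) (0 : Int) := by
  have h1 : C - c = (C - (c + 1)) + 1 := by omega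
  rw [h1, List.replicate_succ, List.range_succ, List.map_append,
      List.set_append_right _ _ (by simp)]
  simp

theorem pvRow_get_lt (f : Nat → Int) (c C j : Nat) (h : j < c) :
    ((List.range c).map f ++ List.replicate (C - c) (0 : Int)).getD j 0 = f j := by
  rw [List.getD_append _ _ _ _ (by simp; omega)]
  exact PySem.List.getD_map_range f c j 0 h

theorem pvRow_getD (pp : List (List Int)) (qt : List Int) (D C : Nat) (ph : Bool) (n c : Nat)
    (hc : c < C) : (pvRow pp qt D C ph n).getD c 0 = pvS pp qt D C ph n c :=
  PySem.List.getD_map_range _ _ _ _ hc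

theorem pvTbl_length (r : Nat → List Int) (C D n : Nat) : (pvTbl r C D n).length = D + 1 := by
  simp [pvTbl]

theorem pvTbl_getD (r : Nat → List Int) (C D n i : Nat) (hi : i < D + 1) :
    (pvTbl r C D n).getD i [] = if n ≤ i then r i else List.replicate C 0 :=
  PySem.List.getD_map_range _ _ _ _ hi

theorem pvTbl_set (r : Nat → List Int) (C D n : Nat) (hn : n ≤ D) :
    (pvTbl r C D (n + 1)).set n (r n) = pvTbl r C D n := by
  apply List.ext_getElem (by simp [pvTbl])
  intro i h1 h2
  have hiD : i < D + 1 := by simpa [pvTbl] using h2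
  by_cases hin : i = n
  · subst hin
    rw [List.getElem_set_self]
    simp only [pvTbl, List.getElem_map, List.getElem_range]
    rw [if_pos (le_refl _)]
  · rw [List.getElem_set_ne (fun h => hin h.symm)]
    simp only [pvTbl, List.getElem_map, List.getElem_range]
    by_cases hni : n + 1 ≤ i
    · rw [if_pos hni, if_pos (by omega)]
    · rw [if_neg hni, if_neg (by omega)]

theorem pvRow_top (pp : List (List Int)) (qt : List Int) (D C : Nat) (ph : Bool) :
    pvRow pp qt D C ph D = List.replicate C 0 := by
  unfold pvRow
  rw [List.map_congr_left (fun x _ => pvS_stop pp qt D C ph D x (by omega))]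
  simp [List.map_const']

theorem pvTbl_top (r : Nat → List Int) (C D : Nat) (hr : r D = List.replicate C 0) :
    pvTbl r C D D = List.replicate (D + 1) (List.replicate C 0) := by
  apply List.ext_getElem (by simp [pvTbl])
  intro i h1 h2
  have hiD : i < D + 1 := by simpa [pvTbl] using h2
  simp only [pvTbl, List.getElem_map, List.getElem_range, List.getElem_replicate]
  by_cases hDi : D ≤ i
  · rw [if_pos hDi, show i = D by omega, hr]
  · rw [if_neg hDi]

-- range(d, -1, -1) is the reversed 0..d  (descending day loop)
theorem pvRangeDown (n : Nat) :
    PySem.List.pyRange ((n : Int) - 1) (-1) (-1) = (List.range n).reverse.map (fun k : Nat => (k : Int)) := by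
  simp only [PySem.List.pyRange]
  rw [if_neg (by norm_num)]
  by_cases hn : 0 < n
  · rw [if_neg (by norm_num), if_pos (by omega)]
    have hc : (((n : Int) - 1 - -1 + - -1 - 1) / - -1).toNat = n := by norm_num
    rw [hc]
    apply List.ext_getElem (by simp)
    intro i h1 h2
    rw [List.getElem_map, List.getElem_map, List.getElem_reverse, List.getElem_range,
        List.getElem_range]
    have h1' : i < n := by simpa using h1
    simp only [List.length_range]
    omega
  · interval_cases n
    rw [if_neg (by norm_num), if_neg (by norm_num)]
    simp

-- one full day of A: the inner city loop fills row n of both tables with the spec rows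
theorem pvStepA (pp : List (List Int)) (qt : List Int) (D C n : Nat)
    (hC2 : 2 ≤ C) (hn : n < D)
    (hq0 : ∀ j : Nat, j < C → 0 ≤ qt.getD j 0) :
    (PySem.List.pyRange 0 (C : Int) 1).foldl (pvACity pp qt (D : Int) (C : Int) (n : Int))
      (pvTbl (pvRow pp qt D C false) C D (n + 1), pvTbl (pvRow pp qt D C true) C D (n + 1))
      = (pvTbl (pvRow pp qt D C false) C D n, pvTbl (pvRow pp qt D C true) C D n) := by
  rw [PySem.List.pyRange_zero_natCast, List.foldl_map]
  have key : ∀ c, c ≤ C →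
      (List.range c).foldl
        (fun st (k : Nat) => pvACity pp qt (D : Int) (C : Int) (n : Int) st (k : Int))
        (pvTbl (pvRow pp qt D C false) C D (n + 1), pvTbl (pvRow pp qt D C true) C D (n + 1))
        = ((pvTbl (pvRow pp qt D C false) C D (n + 1)).set n
             ((List.range c).map (pvS pp qt D C false n) ++ List.replicate (C - c) 0),
           (pvTbl (pvRow pp qt D C true) C D (n + 1)).set n
             ((List.range c).map (pvS pp qt D C true n) ++ List.replicate (C - c) 0)) := by
    intro c
    induction c with
    | zero =>
      simp only [List.range_zero, List.map_nil, List.nil_append, Nat.sub_zero, List.foldl_nil]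
      intro _
      have e1 : (pvTbl (pvRow pp qt D C false) C D (n + 1)).set n (List.replicate C 0)
          = pvTbl (pvRow pp qt D C false) C D (n + 1) := by
        have h1 : (pvTbl (pvRow pp qt D C false) C D (n + 1)).getD n [] = List.replicate C 0 := by
          rw [pvTbl_getD _ _ _ _ _ (by omega), if_neg (by omega)]
        rw [← h1]
        exact pvSet_getD_self _ _ (by rw [pvTbl_length]; omega) _
      have e2 : (pvTbl (pvRow pp qt D C true) C D (n + 1)).set n (List.replicate C 0)
          = pvTbl (pvRow pp qt D C true) C D (n + 1) := by
        have h1 : (pvTbl (pvRow pp qt D C true) C D (n + 1)).getD n [] = List.replicate C 0 := by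
          rw [pvTbl_getD _ _ _ _ _ (by omega), if_neg (by omega)]
        rw [← h1]
        exact pvSet_getD_self _ _ (by rw [pvTbl_length]; omega) _
      rw [e1, e2]
    | succ c ih =>
      intro hc1
      have hcC : c < C := by omega
      rw [List.range_succ, List.foldl_append, ih (by omega), List.foldl_cons, List.foldl_nil]
      set A1 := (pvTbl (pvRow pp qt D C false) C D (n + 1)).set n
        ((List.range c).map (pvS pp qt D C false n) ++ List.replicate (C - c) 0) with hA1def
      set A2 := (pvTbl (pvRow pp qt D C true) C D (n + 1)).set n
        ((List.range c).map (pvS pp qt D C true n) ++ List.replicate (C - c) 0) with hA2def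
      have en1 : ((n : Int) + 1) = ((n + 1 : Nat) : Int) := by push_cast; ring
      have readNq : pvGet2 A1 ((n : Int) + 1) (c : Int) = pvS pp qt D C false (n + 1) c := by
        unfold pvGet2
        rw [en1]
        simp only [PySem.List.pyGetD_natCast]
        rw [hA1def, pvGetD_set_ne _ n (n + 1) (by omega),
            pvTbl_getD _ _ _ _ _ (by omega), if_pos (le_refl _),
            pvRow_getD pp qt D C false (n + 1) c hcC]
      have readQ : ∀ j : Nat, j < C →
          pvGet2 A2 ((n : Int) + 1) ((j : Nat) : Int) = pvS pp qt D C true (n + 1) j := by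
        intro j hj
        unfold pvGet2
        rw [en1]
        simp only [PySem.List.pyGetD_natCast]
        rw [hA2def, pvGetD_set_ne _ n (n + 1) (by omega),
            pvTbl_getD _ _ _ _ _ (by omega), if_pos (le_refl _),
            pvRow_getD pp qt D C true (n + 1) j hj]
      have hrow1get : A1.getD n []
          = (List.range c).map (pvS pp qt D C false n) ++ List.replicate (C - c) 0 := by
        rw [hA1def]
        exact pvGetD_set_self _ n (by rw [pvTbl_length]; omega) _ _
      have hrow2get : A2.getD n []
          = (List.range c).map (pvS pp qt D C true n) ++ List.replicate (C - c) 0 := by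
        rw [hA2def]
        exact pvGetD_set_self _ n (by rw [pvTbl_length]; omega) _ _
      have wr1 : ∀ v : Int, pvSet2 A1 (n : Int) (c : Int) v
          = (pvTbl (pvRow pp qt D C false) C D (n + 1)).set n
              (((List.range c).map (pvS pp qt D C false n) ++ List.replicate (C - c) 0).set c v) := by
        intro v
        unfold pvSet2
        rw [Int.toNat_natCast, Int.toNat_natCast, hrow1get, hA1def, List.set_set]
      have wr2 : ∀ v : Int, pvSet2 A2 (n : Int) (c : Int) v
          = (pvTbl (pvRow pp qt D C true) C D (n + 1)).set n
              (((List.range c).map (pvS pp qt D C true n) ++ List.replicate (C - c) 0).set c v) := by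
        intro v
        unfold pvSet2
        rw [Int.toNat_natCast, Int.toNat_natCast, hrow2get, hA2def, List.set_set]
      have hq := hq0 c hcC
      have stayQeq :
          (if (n : Int) + PySem.List.pyGetD qt (c : Int) 0 < (D : Int) then
              pvGet2 ((pvTbl (pvRow pp qt D C false) C D (n + 1)).set n
                  ((List.range (c + 1)).map (pvS pp qt D C false n) ++ List.replicate (C - (c + 1)) 0))
                ((n : Int) + PySem.List.pyGetD qt (c : Int) 0) (c : Int) else 0)
            = pvBase pp qt D C true n c := by
        rw [pvBase]
        simp only [if_true]
        rw [PySem.List.pyGetD_natCast]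
        obtain ⟨qn, hqn⟩ : ∃ qn : Nat, qt.getD c 0 = (qn : Int) :=
          ⟨(qt.getD c 0).toNat, (Int.toNat_of_nonneg hq).symm⟩
        rw [hqn]
        simp only [Int.toNat_natCast]
        by_cases hg : n + qn < D
        · rw [if_pos (show (n : Int) + (qn : Int) < (D : Int) by exact_mod_cast hg), if_pos hg]
          unfold pvGet2
          rw [show ((n : Int) + (qn : Int)) = ((n + qn : Nat) : Int) by push_cast; ring]
          simp only [PySem.List.pyGetD_natCast]
          cases qn with
          | zero =>
            simp only [Nat.add_zero]
            rw [pvGetD_set_self _ n (by rw [pvTbl_length]; omega) _,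
                pvRow_get_lt (pvS pp qt D C false n) (c + 1) C c (by omega)]
          | succ qm =>
            rw [pvGetD_set_ne _ n (n + (qm + 1)) (by omega),
                pvTbl_getD _ _ _ _ _ (by omega), if_pos (by omega),
                pvRow_getD pp qt D C false (n + (qm + 1)) c hcC]
        · rw [if_neg (show ¬ ((n : Int) + (qn : Int) < (D : Int)) by exact_mod_cast hg), if_neg hg]
      by_cases h0 : c = 0
      · have v1 : max (pvS pp qt D C false (n + 1) c + pvGet2 pp ((n : Int) + 1) (c : Int))
              (pvS pp qt D C true (n + 1) (c + 1)) = pvS pp qt D C false n c := by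
          rw [pvS_unfold pp qt D C false n c hn]
          simp only [if_pos (show c + 1 < C by omega), if_neg (show ¬ 1 ≤ c by omega), pvBase,
                     Bool.false_eq_true, if_false]
        have v2 : max (pvBase pp qt D C true n c)
              (pvS pp qt D C true (n + 1) (c + 1)) = pvS pp qt D C true n c := by
          rw [pvS_unfold pp qt D C true n c hn]
          simp only [if_pos (show c + 1 < C by omega), if_neg (show ¬ 1 ≤ c by omega)]
        simp only [pvACity]
        rw [if_pos (show ((c : Nat) : Int) = 0 by omega)]
        rw [show ((c : Int) + 1) = ((c + 1 : Nat) : Int) by push_cast; ring]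
        rw [readNq, readQ (c + 1) (by omega)]
        rw [v1, wr1 _, pvRow_set (pvS pp qt D C false n) c C hcC]
        rw [stayQeq, v2, wr2 _, pvRow_set (pvS pp qt D C true n) c C hcC]
        simp [List.range_succ]
      · by_cases hlast : c = C - 1
        · have v1 : max (pvS pp qt D C false (n + 1) c + pvGet2 pp ((n : Int) + 1) (c : Int))
                (pvS pp qt D C true (n + 1) (c - 1)) = pvS pp qt D C false n c := by
            rw [pvS_unfold pp qt D C false n c hn]
            simp only [if_neg (show ¬ c + 1 < C by omega), if_pos (show 1 ≤ c by omega), pvBase,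
                       Bool.false_eq_true, if_false]
          have v2 : max (pvBase pp qt D C true n c)
                (pvS pp qt D C true (n + 1) (c - 1)) = pvS pp qt D C true n c := by
            rw [pvS_unfold pp qt D C true n c hn]
            simp only [if_neg (show ¬ c + 1 < C by omega), if_pos (show 1 ≤ c by omega)]
          simp only [pvACity]
          rw [if_neg (show ¬ ((c : Nat) : Int) = 0 by omega),
              if_pos (show ((c : Nat) : Int) = (C : Int) - 1 by omega)]
          rw [show ((c : Int) - 1) = ((c - 1 : Nat) : Int) by omega]
          rw [readNq, readQ (c - 1) (by omega)]
          rw [v1, wr1 _, pvRow_set (pvS pp qt D C false n) c C hcC]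
          rw [stayQeq, v2, wr2 _, pvRow_set (pvS pp qt D C true n) c C hcC]
          simp [List.range_succ]
        · have v1 : max (max (pvS pp qt D C false (n + 1) c + pvGet2 pp ((n : Int) + 1) (c : Int))
                  (pvS pp qt D C true (n + 1) (c + 1)))
                (pvS pp qt D C true (n + 1) (c - 1)) = pvS pp qt D C false n c := by
            rw [pvS_unfold pp qt D C false n c hn]
            simp only [if_pos (show c + 1 < C by omega), if_pos (show 1 ≤ c by omega), pvBase,
                       Bool.false_eq_true, if_false]
          have v2 : max (max (pvBase pp qt D C true n c)
                  (pvS pp qt D C true (n + 1) (c + 1)))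
                (pvS pp qt D C true (n + 1) (c - 1)) = pvS pp qt D C true n c := by
            rw [pvS_unfold pp qt D C true n c hn]
            simp only [if_pos (show c + 1 < C by omega), if_pos (show 1 ≤ c by omega)]
          simp only [pvACity]
          rw [if_neg (show ¬ ((c : Nat) : Int) = 0 by omega),
              if_neg (show ¬ ((c : Nat) : Int) = (C : Int) - 1 by omega)]
          rw [show ((c : Int) + 1) = ((c + 1 : Nat) : Int) by push_cast; ring,
              show ((c : Int) - 1) = ((c - 1 : Nat) : Int) by omega]
          rw [readNq, readQ (c + 1) (by omega), readQ (c - 1) (by omega)]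
          rw [v1, wr1 _, pvRow_set (pvS pp qt D C false n) c C hcC]
          rw [stayQeq, v2, wr2 _, pvRow_set (pvS pp qt D C true n) c C hcC]
          simp [List.range_succ]
  have hfin := key C (le_refl C)
  rw [hfin]
  simp only [Nat.sub_self, List.replicate_zero, List.append_nil]
  rw [show (List.range C).map (pvS pp qt D C false n) = pvRow pp qt D C false n from rfl,
      show (List.range C).map (pvS pp qt D C true n) = pvRow pp qt D C true n from rfl,
      pvTbl_set _ _ _ _ (by omega), pvTbl_set _ _ _ _ (by omega)]

theorem pvFoldA (pp : List (List Int)) (qt : List Int) (D C : Nat)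
    (hDC : 1 ≤ D → 2 ≤ C)
    (hq0 : 1 ≤ D → ∀ j : Nat, j < C → 0 ≤ qt.getD j 0) :
    ∀ n, n ≤ D →
    (((List.range n).reverse.map (fun k : Nat => (k : Int))).foldl
        (fun st day => (PySem.List.pyRange 0 (C : Int) 1).foldl (pvACity pp qt (D : Int) (C : Int) day) st)
        (pvTbl (pvRow pp qt D C false) C D n, pvTbl (pvRow pp qt D C true) C D n))
      = (pvTbl (pvRow pp qt D C false) C D 0, pvTbl (pvRow pp qt D C true) C D 0) := by
  intro n
  induction n with
  | zero => intro _; simp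
  | succ m ih =>
    intro hm
    rw [List.range_succ, List.reverse_append]
    simp only [List.reverse_cons, List.reverse_nil, List.nil_append, List.cons_append,
      List.map_cons, List.foldl_cons]
    rw [pvStepA pp qt D C m (hDC (by omega)) (by omega) (hq0 (by omega))]
    exact ih (by omega)

-- ===== B-side: the memoized recursion computes pvS =====

-- every memo entry holds the spec value of its key
def pvCoh (pp : List (List Int)) (qt : List Int) (D C : Nat)
    (m : PySem.Dict (String × Int × Int) Int) : Prop :=
  ∀ (ph : Bool) (d c : Nat), m.get? (pvBKey ph (d : Int) (c : Int)) = none ∨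
    m.get? (pvBKey ph (d : Int) (c : Int)) = some (pvS pp qt D C ph d c)

theorem pvBKey_inj {ph ph' : Bool} {d c d' c' : Int}
    (h : pvBKey ph d c = pvBKey ph' d' c') : ph = ph' ∧ d = d' ∧ c = c' := by
  cases ph <;> cases ph' <;> simp_all [pvBKey]

theorem pvCoh_empty (pp : List (List Int)) (qt : List Int) (D C : Nat) :
    pvCoh pp qt D C PySem.Dict.empty := by
  intro ph d c; left; simp [PySem.Dict.get?_empty]

theorem pvCoh_insert (pp : List (List Int)) (qt : List Int) (D C : Nat) (ph : Bool) (d c : Nat)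
    (m : PySem.Dict (String × Int × Int) Int) (hm : pvCoh pp qt D C m)
    (v : Int) (hv : v = pvS pp qt D C ph d c) :
    pvCoh pp qt D C (m.insert (pvBKey ph (d : Int) (c : Int)) v) := by
  intro ph' d' c'
  rw [PySem.Dict.get?_insert]
  by_cases hk : pvBKey ph' (d' : Int) (c' : Int) = pvBKey ph (d : Int) (c : Int)
  · right
    rw [if_pos hk]
    obtain ⟨h1, h2, h3⟩ := pvBKey_inj hk
    have hd : d' = d := by exact_mod_cast h2
    have hc : c' = c := by exact_mod_cast h3
    subst h1 hd hc hv
    rfl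
  · rw [if_neg hk]
    exact hm ph' d' c'

theorem pvTail (pp : List (List Int)) (qt : List Int) (D C : Nat) (f : Nat)
    (IH : ∀ (ph : Bool) (d c : Nat) (m : PySem.Dict (String × Int × Int) Int),
      d ≤ D → c < C → 2 * (D - d) + ph.toNat < f → pvCoh pp qt D C m →
      (pvRun pp qt (D : Int) (C : Int) f ph (d : Int) (c : Int) m).2 = pvS pp qt D C ph d c ∧
      pvCoh pp qt D C (pvRun pp qt (D : Int) (C : Int) f ph (d : Int) (c : Int) m).1)
    (ph : Bool) (d c : Nat) (hlt : d < D) (hc : c < C) (hfl : 2 * (D - d) ≤ f)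
    (M1 : PySem.Dict (String × Int × Int) Int) (hM1 : pvCoh pp qt D C M1)
    (base : Int) (hbase : base = pvBase pp qt D C ph d c) :
    (let r2 := if (c : Int) + 1 < (C : Int) then
        ((pvRun pp qt (D : Int) (C : Int) f true ((d : Int) + 1) ((c : Int) + 1) M1).1,
          max base (pvRun pp qt (D : Int) (C : Int) f true ((d : Int) + 1) ((c : Int) + 1) M1).2)
      else (M1, base);
     let r3 := if 1 ≤ (c : Int) then
        ((pvRun pp qt (D : Int) (C : Int) f true ((d : Int) + 1) ((c : Int) - 1) r2.1).1,
          max r2.2 (pvRun pp qt (D : Int) (C : Int) f true ((d : Int) + 1) ((c : Int) - 1) r2.1).2)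
      else r2;
     let m4 := r3.1.insert (pvBKey ph (d : Int) (c : Int)) r3.2;
     m4.getD (pvBKey ph (d : Int) (c : Int)) 0 = pvS pp qt D C ph d c ∧
       pvCoh pp qt D C m4) := by
  have e1 : ((d : Int) + 1) = ((d + 1 : Nat) : Int) := by push_cast; ring
  by_cases hc1 : c + 1 < C
  · rw [if_pos (show ((c : Int) + 1) < ((C : Int)) by exact_mod_cast hc1)]
    have e2 : ((c : Int) + 1) = ((c + 1 : Nat) : Int) := by push_cast; ring
    rw [e1, e2]
    have ih2 := IH true (d + 1) (c + 1) M1 (by omega) hc1 (by simp only [Bool.toNat_true]; omega) hM1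
    rw [ih2.1]
    simp only []
    by_cases hc0 : 1 ≤ c
    · rw [if_pos (show (1 : Int) ≤ (c : Int) by exact_mod_cast hc0),
          show ((c : Int) - 1) = ((c - 1 : Nat) : Int) by omega]
      have ih3 := IH true (d + 1) (c - 1)
        (pvRun pp qt (D : Int) (C : Int) f true ((d + 1 : Nat) : Int) ((c + 1 : Nat) : Int) M1).1
        (by omega) (by omega) (by simp only [Bool.toNat_true]; omega) ih2.2
      rw [ih3.1]
      constructor
      · rw [PySem.Dict.getD_insert_self, hbase, pvS_unfold pp qt D C ph d c hlt]
        simp only [if_pos hc1, if_pos hc0]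
      · exact pvCoh_insert pp qt D C ph d c _ ih3.2 _
          (by rw [hbase, pvS_unfold pp qt D C ph d c hlt]; simp only [if_pos hc1, if_pos hc0])
    · rw [if_neg (show ¬ ((1 : Int) ≤ (c : Int)) by exact_mod_cast hc0)]
      constructor
      · rw [PySem.Dict.getD_insert_self, hbase, pvS_unfold pp qt D C ph d c hlt]
        simp only [if_pos hc1, if_neg hc0]
      · exact pvCoh_insert pp qt D C ph d c _ ih2.2 _
          (by rw [hbase, pvS_unfold pp qt D C ph d c hlt]; simp only [if_pos hc1, if_neg hc0])
  · rw [if_neg (show ¬ (((c : Int) + 1) < ((C : Int))) by exact_mod_cast hc1)]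
    simp only []
    by_cases hc0 : 1 ≤ c
    · rw [if_pos (show (1 : Int) ≤ (c : Int) by exact_mod_cast hc0), e1,
          show ((c : Int) - 1) = ((c - 1 : Nat) : Int) by omega]
      have ih3 := IH true (d + 1) (c - 1) M1 (by omega) (by omega)
        (by simp only [Bool.toNat_true]; omega) hM1
      rw [ih3.1]
      constructor
      · rw [PySem.Dict.getD_insert_self, hbase, pvS_unfold pp qt D C ph d c hlt]
        simp only [if_neg hc1, if_pos hc0]
      · exact pvCoh_insert pp qt D C ph d c _ ih3.2 _
          (by rw [hbase, pvS_unfold pp qt D C ph d c hlt]; simp only [if_neg hc1, if_pos hc0])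
    · rw [if_neg (show ¬ ((1 : Int) ≤ (c : Int)) by exact_mod_cast hc0)]
      constructor
      · rw [PySem.Dict.getD_insert_self, hbase, pvS_unfold pp qt D C ph d c hlt]
        simp only [if_neg hc1, if_neg hc0]
      · exact pvCoh_insert pp qt D C ph d c _ hM1 _
          (by rw [hbase, pvS_unfold pp qt D C ph d c hlt]; simp only [if_neg hc1, if_neg hc0])

theorem pvRunSpec (pp : List (List Int)) (qt : List Int) (D C : Nat)
    (hq0 : 1 ≤ D → ∀ j : Nat, j < C → 0 ≤ qt.getD j 0) :
    ∀ (f : Nat) (ph : Bool) (d c : Nat) (m : PySem.Dict (String × Int × Int) Int),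
      d ≤ D → c < C → 2 * (D - d) + ph.toNat < f → pvCoh pp qt D C m →
      (pvRun pp qt (D : Int) (C : Int) f ph (d : Int) (c : Int) m).2 = pvS pp qt D C ph d c ∧
      pvCoh pp qt D C (pvRun pp qt (D : Int) (C : Int) f ph (d : Int) (c : Int) m).1 := by
  
  intro f
  induction f with
  | zero => intro ph d c m _ _ hf _; omega
  | succ f ih =>
    intro ph d c m hd hc hf hm
    rw [pvRun]
    by_cases hdD : d = D
    · rw [if_pos (show ((d : Int)) = ((D : Int)) by exact_mod_cast hdD)]
      exact ⟨(pvS_stop pp qt D C ph d c (by omega)).symm, hm⟩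
    · have hlt : d < D := lt_of_le_of_ne hd hdD
      rw [if_neg (fun h => hdD (by exact_mod_cast h))]
      rcases hm ph d c with hget | hget
      · rw [hget]
        cases ph
        · -- ph = false
          have ih1 := ih false (d + 1) c m (by omega) hc
            (by simp only [Bool.toNat_false] at hf ⊢; omega) hm
          rw [show ((d + 1 : Nat) : Int) = (d : Int) + 1 by push_cast; ring] at ih1
          refine pvTail pp qt D C f ih false d c hlt hc
            (by simp only [Bool.toNat_false] at hf; omega) _ ?_ _ ?_
          · simp only [Bool.false_eq_true, if_false]
            exact ih1.2
          · simp only [Bool.false_eq_true, if_false, pvBase]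
            rw [ih1.1]
        · -- ph = true
          have hq := hq0 (by omega) c hc
          have hqe : PySem.List.pyGetD qt (c : Int) 0 = (((qt.getD c 0).toNat : Nat) : Int) := by
            rw [PySem.List.pyGetD_natCast]
            exact (Int.toNat_of_nonneg hq).symm
          refine pvTail pp qt D C f ih true d c hlt hc
            (by simp only [Bool.toNat_true] at hf; omega) _ ?_ _ ?_
          · simp only [if_true]
            rw [hqe]
            by_cases hj : d + (qt.getD c 0).toNat < D
            · rw [if_pos (show (d : Int) + (((qt.getD c 0).toNat : Nat) : Int) < (D : Int) by
                    omega),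
                  show (d : Int) + (((qt.getD c 0).toNat : Nat) : Int)
                      = ((d + (qt.getD c 0).toNat : Nat) : Int) by push_cast; ring]
              exact (ih false (d + (qt.getD c 0).toNat) c m (by omega) hc
                (by simp only [Bool.toNat_false, Bool.toNat_true] at hf ⊢; omega) hm).2
            · rw [if_neg (show ¬ ((d : Int) + (((qt.getD c 0).toNat : Nat) : Int) < (D : Int)) by
                    omega)]
              exact hm
          · simp only [if_true, pvBase]
            rw [hqe]
            simp only [Int.toNat_natCast]
            by_cases hj : d + (qt.getD c 0).toNat < D
            · rw [if_pos (show (d : Int) + (((qt.getD c 0).toNat : Nat) : Int) < (D : Int) by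
                    omega),
                  show (d : Int) + (((qt.getD c 0).toNat : Nat) : Int)
                      = ((d + (qt.getD c 0).toNat : Nat) : Int) by push_cast; ring,
                  if_pos hj]
              exact (ih false (d + (qt.getD c 0).toNat) c m (by omega) hc
                (by simp only [Bool.toNat_false, Bool.toNat_true] at hf ⊢; omega) hm).1
            · rw [if_neg (show ¬ ((d : Int) + (((qt.getD c 0).toNat : Nat) : Int) < (D : Int)) by
                    omega),
                  if_neg hj]
      · rw [hget]
        exact ⟨rfl, hm⟩


theorem pvFoldCityCoh (pp : List (List Int)) (qt : List Int) (D C : Nat)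
    (hq0 : 1 ≤ D → ∀ j : Nat, j < C → 0 ≤ qt.getD j 0) (ph : Bool) (d : Nat) (hd : d ≤ D) :
    ∀ (l : List Nat), (∀ x ∈ l, x < C) →
    ∀ m, pvCoh pp qt D C m →
    pvCoh pp qt D C (l.foldl
      (fun m (c : Nat) => (pvRun pp qt (D : Int) (C : Int) (2 * D + 3) ph (d : Int) (c : Int) m).1) m) := by
  intro l
  induction l with
  | nil => intro _ m hm; exact hm
  | cons x xs ih =>
    intro hl m hm
    rw [List.foldl_cons]
    exact ih (fun y hy => hl y (List.mem_cons_of_mem _ hy))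
      _ ((pvRunSpec pp qt D C hq0 (2 * D + 3) ph d x m hd (hl x (List.mem_cons_self))
          (by cases ph <;> simp only [Bool.toNat_false, Bool.toNat_true] <;> omega) hm).2)

theorem pvWarmCoh (pp : List (List Int)) (qt : List Int) (D C : Nat)
    (hq0 : 1 ≤ D → ∀ j : Nat, j < C → 0 ≤ qt.getD j 0) :
    ∀ (l : List Nat), (∀ x ∈ l, x ≤ D) →
    ∀ m, pvCoh pp qt D C m →
    pvCoh pp qt D C (l.foldl
      (fun m (day : Nat) =>
        (List.range C).foldl
          (fun m (c : Nat) => (pvRun pp qt (D : Int) (C : Int) (2 * D + 3) true (day : Int) (c : Int) m).1)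
          ((List.range C).foldl
            (fun m (c : Nat) => (pvRun pp qt (D : Int) (C : Int) (2 * D + 3) false (day : Int) (c : Int) m).1) m))
      m) := by
  intro l
  induction l with
  | nil => intro _ m hm; exact hm
  | cons x xs ih =>
    intro hl m hm
    rw [List.foldl_cons]
    refine ih (fun y hy => hl y (List.mem_cons_of_mem _ hy)) _ ?_
    refine pvFoldCityCoh pp qt D C hq0 true x (hl x (List.mem_cons_self)) _
      (fun y hy => List.mem_range.mp hy) _ ?_
    exact pvFoldCityCoh pp qt D C hq0 false x (hl x (List.mem_cons_self)) _
      (fun y hy => List.mem_range.mp hy) _ hm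

theorem pvGather (pp : List (List Int)) (qt : List Int) (D C : Nat)
    (hq0 : 1 ≤ D → ∀ j : Nat, j < C → 0 ≤ qt.getD j 0) (ph : Bool) :
    ∀ (k : Nat), k ≤ C →
    ∀ (m : PySem.Dict (String × Int × Int) Int) (acc : List Int), pvCoh pp qt D C m →
    ((List.range k).foldl
        (fun (st : PySem.Dict (String × Int × Int) Int × List Int) (c : Nat) =>
          ((pvRun pp qt (D : Int) (C : Int) (2 * D + 3) ph 0 (c : Int) st.1).1,
            (pvRun pp qt (D : Int) (C : Int) (2 * D + 3) ph 0 (c : Int) st.1).2 :: st.2))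
        (m, acc)).2
      = ((List.range k).map (pvS pp qt D C ph 0)).reverse ++ acc ∧
    pvCoh pp qt D C ((List.range k).foldl
        (fun (st : PySem.Dict (String × Int × Int) Int × List Int) (c : Nat) =>
          ((pvRun pp qt (D : Int) (C : Int) (2 * D + 3) ph 0 (c : Int) st.1).1,
            (pvRun pp qt (D : Int) (C : Int) (2 * D + 3) ph 0 (c : Int) st.1).2 :: st.2))
        (m, acc)).1 := by
  intro k
  induction k with
  | zero => intro _ m acc hm; simp only [List.range_zero, List.foldl_nil, List.map_nil, List.reverse_nil, List.nil_append]; exact ⟨trivial, hm⟩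
  | succ j ih =>
    intro hk m acc hm
    rw [List.range_succ, List.foldl_append, List.foldl_cons, List.foldl_nil]
    obtain ⟨h2, h1⟩ := ih (by omega) m acc hm
    have hr := pvRunSpec pp qt D C hq0 (2 * D + 3) ph 0 j _ (by omega) (by omega)
      (by cases ph <;> simp only [Bool.toNat_false, Bool.toNat_true] <;> omega) h1
    rw [show ((0 : Nat) : Int) = (0 : Int) by norm_num] at hr
    constructor
    · simp only [h2, hr.1, List.map_append, List.map_cons, List.map_nil,
        List.reverse_append, List.reverse_cons, List.reverse_nil, List.nil_append,
        List.cons_append]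
    · exact hr.2

-- ===== VERDICT (by name: the statement is the Claim_ definition above) =====
theorem bu_best_itinerary_spec : Claim_equal_bu_best_itinerary := by
  intro pp days cities qt _ hpre
  obtain ⟨hd0, hc1, hrest⟩ := hpre
  obtain ⟨D, rfl⟩ := Int.eq_ofNat_of_zero_le hd0
  obtain ⟨C, rfl⟩ := Int.eq_ofNat_of_zero_le (by omega : (0 : Int) ≤ cities)
  have hC1 : 1 ≤ C := by exact_mod_cast hc1
  have hDC : 1 ≤ D → 2 ≤ C := fun h => by exact_mod_cast (hrest (by exact_mod_cast h)).1
  have hq0 : 1 ≤ D → ∀ j : Nat, j < C → 0 ≤ qt.getD j 0 := by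
    intro hD1 j hj
    obtain ⟨hdc2, hlenpp, hrows, hlenqt, hqpre⟩ := hrest (by exact_mod_cast hD1)
    have hClen : C ≤ qt.length := by exact_mod_cast hlenqt
    have hjlen : j < qt.length := by omega
    have hmem : qt.getD j 0 ∈ qt.take ((C : Int)).toNat := by
      rw [List.getD_eq_getElem qt 0 hjlen,
          show qt[j] = (qt.take ((C : Int)).toNat)[j]'(by simp [Int.toNat_natCast]; omega) from
            (List.getElem_take ..).symm]
      exact List.getElem_mem _
    exact hqpre _ hmem
  unfold Spec_bu_best_itinerary
  have hA : bu_best_itinerary pp (D : Int) (C : Int) qt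
      = max ((PySem.List.max? (pvRow pp qt D C false 0) (fun x => x)).getD 0)
            ((PySem.List.max? (pvRow pp qt D C true 0) (fun x => x)).getD 0) := by
    unfold bu_best_itinerary
    simp only [Int.toNat_natCast]
    have hinit : (PySem.List.pyRange 0 ((D : Int) + 1) 1).map (fun _ => List.replicate C (0 : Int))
        = List.replicate (D + 1) (List.replicate C 0) := by
      rw [show ((D : Int) + 1) = ((D + 1 : Nat) : Int) by push_cast; ring,
          PySem.List.pyRange_zero_natCast, List.map_map]
      rw [show ((fun _ => List.replicate C (0 : Int)) ∘ fun k : Nat => (k : Int))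
            = (fun _ => List.replicate C (0 : Int)) from rfl, List.map_const']
      simp
    rw [hinit, pvRangeDown D]
    have hfold := pvFoldA pp qt D C hDC hq0 D (le_refl D)
    rw [pvTbl_top _ _ _ (pvRow_top pp qt D C false), pvTbl_top _ _ _ (pvRow_top pp qt D C true)]
      at hfold
    rw [hfold]
    simp only [PySem.List.pyGetD_ofNat']
    rw [pvTbl_getD _ _ _ _ _ (by omega), if_pos (by omega),
        pvTbl_getD _ _ _ _ _ (by omega), if_pos (by omega)]
  have hB : bu_best_itinerary_alt pp (D : Int) (C : Int) qt
      = max ((PySem.List.max? (pvRow pp qt D C false 0) (fun x => x)).getD 0)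
            ((PySem.List.max? (pvRow pp qt D C true 0) (fun x => x)).getD 0) := by
    unfold bu_best_itinerary_alt
    simp only [Int.toNat_natCast, PySem.List.pyRange_zero_natCast, ← List.map_reverse,
      List.foldl_map]
    have hwarm := pvWarmCoh pp qt D C hq0 (List.range D).reverse
      (fun x hx => by
        have := List.mem_range.mp (List.mem_reverse.mp hx); omega)
      PySem.Dict.empty (pvCoh_empty pp qt D C)
    have hg1 := pvGather pp qt D C hq0 false C (le_refl C) _ [] hwarm
    have hg2 := pvGather pp qt D C hq0 true C (le_refl C) _ [] hg1.2
    rw [hg1.1, hg2.1]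
    simp [pvRow]
  rw [hA, hB]
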